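-- pv_equiv track=rewrite | github.com/Shri-harshini/Autonomous-Research-Assistant | agents/synthesizer_agent.py | extract_trend_description
-- ===== SOURCE A (Python) =====
-- from typing import Dict, List, Optional, Any, Tuple
--
-- def extract_trend_description(sentence: str, direction: str) -> Optional[str]:
--     """Extract trend description from sentence."""
--     # Simple extraction - can be improved with NLP
--     words = sentence.split()
--
--     for i, word in enumerate(words):
--         if word.lower() in ["increase", "rise", "grow", "growth", "decrease", "decline", "fall", "drop"]:
--             # Extract surrounding context
--             start = max(0, i - 3)
--             end = min(len(words), i + 4)
--             return " ".join(words[start:end])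
--
--     return None
-- ===== SOURCE B (Python) =====
-- def extract_trend_description(sentence: str, direction: str):
--     """Extract trend description from sentence (keyword-driven lookup)."""
--     words = sentence.split()
--     lowered = [w.lower() for w in words]
--     best = None
--     for kw in ["increase", "rise", "grow", "growth", "decrease", "decline", "fall", "drop"]:
--         if kw in lowered:
--             j = lowered.index(kw)
--             if best is None or j < best:
--                 best = j
--     if best is None:
--         return None
--     start = max(0, best - 3)
--     end = min(len(words), best + 4)
--     return " ".join(words[start:end])
-- ===== Notes on version B (the rewrite author's own statement) =====
-- stated objective: alternative
-- what changed: Inverts the traversal: instead of scanning the words once and testing each lowercased word against the keyword list, B lowercases the word list once and loops over the eight keywords, taking each keyword's first-occurrence index and keeping the minimum; the window is then cut at that minimal index.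
import Mathlib
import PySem

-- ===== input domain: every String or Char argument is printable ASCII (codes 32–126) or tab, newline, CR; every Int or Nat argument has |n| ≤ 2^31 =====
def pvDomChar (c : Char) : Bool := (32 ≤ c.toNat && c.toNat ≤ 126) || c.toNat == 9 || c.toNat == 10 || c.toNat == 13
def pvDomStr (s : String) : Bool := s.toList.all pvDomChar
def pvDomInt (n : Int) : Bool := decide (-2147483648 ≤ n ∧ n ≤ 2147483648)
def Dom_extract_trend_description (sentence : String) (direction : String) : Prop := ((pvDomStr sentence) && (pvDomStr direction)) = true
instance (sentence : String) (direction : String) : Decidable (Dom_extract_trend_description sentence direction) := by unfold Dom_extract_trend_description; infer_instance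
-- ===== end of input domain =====

-- B inverts A's traversal: A scans the words once testing each lowercased word for keyword
-- membership; B lowercases the word list once, then loops over the eight keywords taking each
-- one's first-occurrence index and keeping the minimum (objective: alternative, not faster).

-- ===== PORT A =====
-- the keyword list literal from A's membership test
def pvKeywords : List String :=
  ["increase", "rise", "grow", "growth", "decrease", "decline", "fall", "drop"]

-- start = max(0, i-3); end = min(len(words), i+4); return " ".join(words[start:end])
def pvWindow (words : List String) (i : Int) : String :=
  PySem.Str.join " " (PySem.List.slice words (some (max 0 (i - 3))) (some (min (words.length : Int) (i + 4))))

-- for i, word in enumerate(words): …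
def pvALoop (words : List String) (pairs : List (Int × String)) : Option String :=
  match pairs with
  | [] => none
  | (i, w) :: rest =>
      if pvKeywords.contains (PySem.Str.lower w) then some (pvWindow words i)
      else pvALoop words rest

def extract_trend_description (sentence : String) (direction : String) : Option String :=
  let words := PySem.Str.split₀ sentence
  pvALoop words (PySem.List.enumerate words)

-- ===== PORT B =====
-- 'if kw in lowered: j = lowered.index(kw); if best is None or j < best: best = j'
-- (index? is none exactly when kw is not in lowered, so the membership test and .index are fused)
def pvBStep (lowered : List String) (best : Option Nat) (kw : String) : Option Nat :=
  match PySem.List.index? lowered kw with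
  | none => best
  | some j =>
      match best with
      | none => some j
      | some b => if j < b then some j else some b

def extract_trend_description_alt (sentence : String) (direction : String) : Option String :=
  let words := PySem.Str.split₀ sentence
  let lowered := words.map PySem.Str.lower
  let best := pvKeywords.foldl (pvBStep lowered) none
  match best with
  | none => none
  | some i => some (pvWindow words (i : Int))

-- ===== PRECONDITION & SPEC =====
def Spec_extract_trend_description (sentence : String) (direction : String) (out : Option String) : Prop := out = extract_trend_description_alt sentence direction
instance (sentence : String) (direction : String) (out : Option String) : Decidable (Spec_extract_trend_description sentence direction out) := by unfold Spec_extract_trend_description; infer_instance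

-- ===== CLAIM (what is proved, stated in full; the proofs are below) =====
def Claim_equal_extract_trend_description : Prop := ∀ (sentence : String) (direction : String), Dom_extract_trend_description sentence direction → Spec_extract_trend_description sentence direction (extract_trend_description sentence direction)

-- ===== LEMMAS AND PROOFS =====

-- option-valued minimum, the combining step of B's fold
def pvOmin (b : Option Nat) (o : Option Nat) : Option Nat :=
  match o with
  | none => b
  | some j =>
      match b with
      | none => some j
      | some b' => if j < b' then some j else some b'

theorem pvBStep_eq (l : List String) (b : Option Nat) (kw : String) :
    pvBStep l b kw = pvOmin b (PySem.List.index? l kw) := rfl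

theorem pvOmin_none_left (o : Option Nat) : pvOmin none o = o := by
  cases o <;> rfl

theorem pvOmin_none_right (b : Option Nat) : pvOmin b none = b := rfl

theorem pvOmin_some (x y : Nat) : pvOmin (some x) (some y) = some (min y x) := by
  simp only [pvOmin]
  split_ifs <;> congr 1 <;> omega

theorem pvOmin_assoc (a b c : Option Nat) :
    pvOmin (pvOmin a b) c = pvOmin a (pvOmin b c) := by
  cases a <;> cases b <;> cases c <;>
    simp only [pvOmin_none_left, pvOmin_none_right, pvOmin_some] <;>
    (try rfl) <;> congr 1 <;> omega

theorem pvOmin_map_succ (a b : Option Nat) :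
    pvOmin (a.map (· + 1)) (b.map (· + 1)) = (pvOmin a b).map (· + 1) := by
  cases a <;> cases b <;>
    simp only [Option.map_none, Option.map_some, pvOmin_none_left, pvOmin_none_right,
      pvOmin_some] <;> (try rfl) <;> congr 1 <;> omega

-- findIdx? of a disjunction is the pvOmin of the two findIdx?'s
theorem findIdx?_or (p q : String → Bool) (l : List String) :
    List.findIdx? (fun x => p x || q x) l
      = pvOmin (List.findIdx? p l) (List.findIdx? q l) := by
  induction l with
  | nil => rfl
  | cons x xs ih =>
    by_cases hp : p x = true <;> by_cases hq : q x = true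
    · simp [List.findIdx?_cons, hp, hq, pvOmin]
    · cases hfq : List.findIdx? q xs <;>
        simp [List.findIdx?_cons, hp, hq, hfq, pvOmin]
    · cases hfp : List.findIdx? p xs <;>
        simp [List.findIdx?_cons, hp, hq, hfp, pvOmin]
    · simp [List.findIdx?_cons, hp, hq, ih, pvOmin_map_succ]

-- index? is findIdx? of equality
theorem index?_eq_findIdx? (l : List String) (kw : String) :
    PySem.List.index? l kw = List.findIdx? (fun x => x == kw) l := by
  rw [PySem.List.index?_eq_idxOf?]
  rfl

-- B's fold over the keyword list computes the first index whose element is a keyword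
theorem fold_bstep_spec (K : List String) (l : List String) (b : Option Nat) :
    K.foldl (pvBStep l) b = pvOmin b (List.findIdx? (fun x => K.contains x) l) := by
  induction K generalizing b with
  | nil =>
    have h0 : List.findIdx? (fun x : String => ([] : List String).contains x) l = none := by
      simp [List.findIdx?_eq_none_iff]
    rw [List.foldl_nil, h0, pvOmin_none_right]
  | cons kw K' ih =>
    have hcont : (fun x : String => (kw :: K').contains x)
        = fun x => (x == kw) || K'.contains x := by
      funext x
      by_cases h : x = kw
      · simp [h]
      · simp [beq_iff_eq, h, Ne.symm h]
    rw [List.foldl_cons, ih, pvBStep_eq, index?_eq_findIdx?, hcont,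
      findIdx?_or, pvOmin_assoc]

-- A's loop over the enumerated words returns the window at the first keyword index
theorem aLoop_spec (ws all : List String) (s : Int) :
    pvALoop all (PySem.List.enumerate ws s)
      = (List.findIdx? (fun w => pvKeywords.contains (PySem.Str.lower w)) ws).map
          (fun (k : Nat) => pvWindow all (s + (k : Int))) := by
  induction ws generalizing s with
  | nil => simp [PySem.List.enumerate_nil, pvALoop]
  | cons w rest ih =>
    rw [PySem.List.enumerate_cons]
    by_cases h : pvKeywords.contains (PySem.Str.lower w) = true
    · simp only [pvALoop, List.findIdx?_cons, if_pos h, Option.map_some]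
      norm_num
    · simp only [pvALoop, List.findIdx?_cons, if_neg h, ih, Option.map_map]
      congr 1
      funext k
      simp only [Function.comp]
      congr 1
      push_cast
      ring

-- ===== VERDICT (by name: the statement is the Claim_ definition above) =====
theorem extract_trend_description_spec : Claim_equal_extract_trend_description := by
  intro sentence direction _
  unfold Spec_extract_trend_description extract_trend_description extract_trend_description_alt
  simp only [aLoop_spec, fold_bstep_spec, List.findIdx?_map, pvOmin_none_left]
  have hcomp : ((fun x => pvKeywords.contains x) ∘ PySem.Str.lower)
      = fun w => pvKeywords.contains (PySem.Str.lower w) := rfl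
  rw [hcomp]
  cases List.findIdx? (fun w => pvKeywords.contains (PySem.Str.lower w)) (PySem.Str.split₀ sentence) with
  | none => rfl
  | some k => simp
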